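-- pv_equiv track=rewrite | github.com/goncalocribeiro/IAProject | project.py | vertical_compaction
-- ===== SOURCE A (Python) =====
-- def vertical_compaction(board):
-- 	count = 0
--
-- 	for column in range(board_c(board)):
-- 		for row in range(board_l(board)-1, -1, -1):
-- 			position = make_pos(row, column)
-- 			position_content = board_position_content(position, board)
--
-- 			if position_content == 0:
-- 				count += 1
-- 				for index in range (row-1, -1, -1):
-- 					index_position = make_pos(index, column)
-- 					index_position_content = board_position_content(index_position, board)
--
-- 					if index_position_content == 0:
-- 						count += 1
-- 					else:
-- 						board[index+count][column] = index_position_content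
-- 						board[index][column] = 0
-- 				count = 0
-- 				break
-- 	return board
--
-- def make_pos(l, c):
--     return (l, c)
--
-- def pos_l(pos):
--     return pos[0]
--
-- def pos_c(pos):
--     return pos[1]
--
-- def board_c(board):
-- 	return len(board[0])
--
-- def board_l(board):
-- 	return len(board)
--
-- def board_position_content(pos, board):
-- 	row = pos_l(pos)
-- 	column = pos_c(pos)
-- 	return board[row][column]
-- ===== SOURCE B (Python) =====
-- def vertical_compaction(board):
--     ncols = len(board[0])
--     rows = len(board)
--     for c in range(ncols):
--         nz = [row[c] for row in board if row[c] != 0]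
--         newcol = [0] * (rows - len(nz)) + nz
--         for r in range(rows):
--             board[r][c] = newcol[r]
--     return board
-- ===== Notes on version B (the rewrite author's own statement) =====
-- stated objective: faster
-- what changed: A shifts cells down one column at a time with a bottom-up scan, a zero counter and per-cell in-place index arithmetic (quadratic in the number of rows per column); B rebuilds each column directly as zeros followed by its non-zero values and writes it back in one pass.
import Mathlib
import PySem

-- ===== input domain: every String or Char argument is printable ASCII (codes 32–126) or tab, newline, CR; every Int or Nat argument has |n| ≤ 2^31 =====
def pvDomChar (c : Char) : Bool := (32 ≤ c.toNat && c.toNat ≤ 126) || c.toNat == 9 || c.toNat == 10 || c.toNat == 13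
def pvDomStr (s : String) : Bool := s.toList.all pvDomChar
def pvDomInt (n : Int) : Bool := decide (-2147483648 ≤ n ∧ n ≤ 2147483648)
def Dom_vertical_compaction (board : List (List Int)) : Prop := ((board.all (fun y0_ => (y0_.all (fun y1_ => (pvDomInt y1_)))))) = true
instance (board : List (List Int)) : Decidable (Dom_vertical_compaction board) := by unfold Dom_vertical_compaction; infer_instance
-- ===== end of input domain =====

-- B rebuilds each column as zeros ++ non-zero values instead of A's bottom-up shifting scan
-- with a zero counter; return value AND in-place mutation coincide (both mutate `board`).

-- ===== PORT A =====
-- board[r][c] read; Pre_ guarantees indices are in range, so getD's default is never produced.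
def pvAt (b : List (List Int)) (r c : Nat) : Int := (b.getD r []).getD c 0

-- board[r][c] = v
def pvSet2 : List (List Int) → Nat → Nat → Int → List (List Int)
  | [], _, _, _ => []
  | row :: rest, 0, c, v => row.set c v :: rest
  | row :: rest, r+1, c, v => row :: pvSet2 rest r c v

-- inner `for index in range(row-1, -1, -1)` loop; fuel j = index+1
def pvIdxLoop (c : Nat) : Nat → Nat → List (List Int) → List (List Int)
  | 0, _, b => b
  | j+1, count, b =>
    let v := pvAt b j c
    if v = 0 then pvIdxLoop c j (count + 1) b
    else pvIdxLoop c j count (pvSet2 (pvSet2 b (j + count) c v) j c 0)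

-- `for row in range(board_l(board)-1, -1, -1)` with the `break`; fuel m = row+1
def pvRowLoop (c : Nat) : Nat → List (List Int) → List (List Int)
  | 0, b => b
  | r+1, b => if pvAt b r c = 0 then pvIdxLoop c r 1 b else pvRowLoop c r b

def vertical_compaction (board : List (List Int)) : List (List Int) :=
  (List.range (board.headD []).length).foldl (fun b c => pvRowLoop c b.length b) board

-- ===== PORT B =====
def pvColOf (c : Nat) (b : List (List Int)) : List Int := b.map (fun row => row.getD c 0)

def pvCompactCol (rows : Nat) (col : List Int) : List Int :=
  let nz := col.filter (fun v => v ≠ 0)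
  List.replicate (rows - nz.length) 0 ++ nz

-- `for r in range(rows): board[r][c] = newcol[r]`
def pvWriteCol (c : Nat) (col : List Int) (b : List (List Int)) : List (List Int) :=
  b.mapIdx (fun r row => row.set c (col.getD r 0))

def vertical_compaction_alt (board : List (List Int)) : List (List Int) :=
  (List.range (board.headD []).length).foldl
    (fun b c => pvWriteCol c (pvCompactCol b.length (pvColOf c b)) b) board

-- ===== PRECONDITION & SPEC =====
-- Pre_ excludes exactly the inputs on which A raises IndexError: the empty board
-- (len(board[0])) and boards where some row is shorter than row 0 (board[row][column]).
def Pre_vertical_compaction (board : List (List Int)) : Prop :=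
  board ≠ [] ∧ ∀ row ∈ board, (board.headD []).length ≤ row.length

instance (board : List (List Int)) : Decidable (Pre_vertical_compaction board) := by
  unfold Pre_vertical_compaction; infer_instance

def pvWitness_vertical_compaction : List (List Int) := [[1, 0], [0, 2], [3, 4]]

def Spec_vertical_compaction (board : List (List Int)) (out : List (List Int)) : Prop := out = vertical_compaction_alt board
instance (board : List (List Int)) (out : List (List Int)) : Decidable (Spec_vertical_compaction board out) := by unfold Spec_vertical_compaction; infer_instance

-- ===== CLAIM (what is proved, stated in full; the proofs are below) =====
def Claim_equal_vertical_compaction : Prop := ∀ (board : List (List Int)), Dom_vertical_compaction board → Pre_vertical_compaction board → Spec_vertical_compaction board (vertical_compaction board)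

-- ===== LEMMAS AND PROOFS =====

-- list-level mirrors of A's two loops, acting on a single column
def pvIdxLoopL : Nat → Nat → List Int → List Int
  | 0, _, col => col
  | j+1, count, col =>
    let v := col.getD j 0
    if v = 0 then pvIdxLoopL j (count + 1) col
    else pvIdxLoopL j count ((col.set (j + count) v).set j 0)

def pvRowLoopL : Nat → List Int → List Int
  | 0, col => col
  | r+1, col => if col.getD r 0 = 0 then pvIdxLoopL r 1 col else pvRowLoopL r col

-- small list facts
theorem pv_getD_append_len (xs ys : List Int) (y d : Int) :
    (xs ++ y :: ys).getD xs.length d = y := by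
  induction xs with
  | nil => rfl
  | cons a t ih => simp

theorem pv_set_append_len (xs ys : List Int) (y v : Int) :
    (xs ++ y :: ys).set xs.length v = xs ++ v :: ys := by
  induction xs with
  | nil => simp
  | cons a t ih => simp [ih]

theorem pv_set_getD_self (l : List Int) (i : Nat) (h : i < l.length) :
    l.set i (l.getD i 0) = l := by
  rw [List.getD_eq_getElem l 0 h]; exact List.set_getElem_self h

-- ===== the single-column, list-level characterisation of A's loops =====

theorem pvIdxLoopL_eq (front : List Int) : ∀ (count : Nat) (tail : List Int), 1 ≤ count →
    pvIdxLoopL front.length count (front ++ List.replicate count 0 ++ tail)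
      = List.replicate (count + (front.length - (front.filter (fun v => v ≠ 0)).length)) 0
          ++ front.filter (fun v => v ≠ 0) ++ tail := by
  induction front using List.reverseRecOn with
  | nil => intro count tail _; simp [pvIdxLoopL]
  | append_singleton f v ih =>
    intro count tail hc
    have hlen : (f ++ [v]).length = f.length + 1 := by simp
    rw [hlen]
    have hget : ((f ++ [v]) ++ List.replicate count 0 ++ tail).getD f.length 0 = v := by
      have : (f ++ [v]) ++ List.replicate count 0 ++ tail
          = f ++ v :: (List.replicate count 0 ++ tail) := by simp
      rw [this]; exact pv_getD_append_len ..
    by_cases hv : v = 0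
    · subst hv
      rw [pvIdxLoopL]
      simp only [hget]
      have hre : (f ++ [(0:Int)]) ++ List.replicate count 0 ++ tail
          = f ++ List.replicate (count + 1) 0 ++ tail := by
        rw [List.replicate_succ]; simp
      rw [hre, ih (count + 1) tail (by omega)]
      have h1 : (f ++ [(0:Int)]).filter (fun v => v ≠ 0) = f.filter (fun v => v ≠ 0) := by
        simp [List.filter_append]
      rw [h1]
      have hle := List.length_filter_le (fun v => decide (v ≠ 0)) f
      have : count + 1 + (f.length - (f.filter (fun v => v ≠ 0)).length)
          = count + ((f ++ [(0:Int)]).length - (f.filter (fun v => v ≠ 0)).length) := by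
        simp only [List.length_append, List.length_cons, List.length_nil]
        omega
      rw [this]
      simp
    · obtain ⟨k, rfl⟩ : ∃ k, count = k + 1 := ⟨count - 1, by omega⟩
      rw [pvIdxLoopL]
      simp only [hget, if_neg hv]
      have hsplit : (f ++ [v]) ++ List.replicate (k+1) 0 ++ tail
          = (f ++ v :: List.replicate k 0) ++ (0:Int) :: tail := by
        rw [List.replicate_succ']; simp
      have hset1 : (((f ++ [v]) ++ List.replicate (k+1) 0 ++ tail).set (f.length + (k+1)) v)
          = (f ++ v :: List.replicate k 0) ++ v :: tail := by
        rw [hsplit]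
        have hl : (f ++ v :: List.replicate k 0).length = f.length + (k + 1) := by simp
        rw [← hl]; exact pv_set_append_len ..
      have hset2 : ((f ++ v :: List.replicate k 0) ++ v :: tail).set f.length 0
          = f ++ List.replicate (k+1) 0 ++ (v :: tail) := by
        have h2 : (f ++ v :: List.replicate k 0) ++ v :: tail
            = f ++ v :: (List.replicate k 0 ++ v :: tail) := by simp
        rw [h2, pv_set_append_len, List.replicate_succ]; simp
      rw [hset1, hset2, ih (k+1) (v :: tail) (by omega)]
      have h1 : (f ++ [v]).filter (fun v => v ≠ 0) = f.filter (fun v => v ≠ 0) ++ [v] := by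
        simp [List.filter_append, hv]
      rw [h1]
      have hle := List.length_filter_le (fun v => decide (v ≠ 0)) f
      have : k + 1 + (f.length - (f.filter (fun v => v ≠ 0)).length)
          = k + 1 + ((f ++ [v]).length - (f.filter (fun v => v ≠ 0) ++ [v]).length) := by
        simp only [List.length_append, List.length_cons, List.length_nil]
        omega
      rw [this]; simp

theorem pvRowLoopL_eq (col : List Int) : ∀ (r : Nat), r ≤ col.length →
    (∀ i, (hi : i < col.length) → r ≤ i → col[i] ≠ 0) →
    pvRowLoopL r col
      = List.replicate (col.length - (col.filter (fun v => v ≠ 0)).length) 0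
          ++ col.filter (fun v => v ≠ 0) := by
  intro r
  induction r with
  | zero =>
    intro _ h
    have : col.filter (fun v => v ≠ 0) = col := by
      apply List.filter_eq_self.mpr
      intro a ha
      obtain ⟨i, hi, rfl⟩ := List.mem_iff_getElem.mp ha
      simpa using h i hi (Nat.zero_le i)
    rw [pvRowLoopL, this]; simp
  | succ r ih =>
    intro hr h
    have hrlt : r < col.length := by omega
    rw [pvRowLoopL, List.getD_eq_getElem col 0 hrlt]
    by_cases hz : col[r] = 0
    · rw [if_pos hz]
      have hdec : col = col.take r ++ (0:Int) :: col.drop (r+1) := by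
        conv_lhs => rw [← List.take_append_drop r col]
        rw [List.drop_eq_getElem_cons hrlt, hz]
      have hlt : (col.take r).length = r := by simp [List.length_take]; omega
      have hd : ∀ v ∈ col.drop (r+1), v ≠ 0 := by
        intro v hv
        obtain ⟨i, hi, rfl⟩ := List.mem_iff_getElem.mp hv
        rw [List.getElem_drop]
        exact h (r+1+i) (by have := hi; simp [List.length_drop] at this; omega) (by omega)
      have hdf : (col.drop (r+1)).filter (fun v => v ≠ 0) = col.drop (r+1) :=
        List.filter_eq_self.mpr (by intro a ha; simpa using hd a ha)
      have key := pvIdxLoopL_eq (col.take r) 1 (col.drop (r+1)) (by omega)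
      rw [hlt] at key
      have harg : col.take r ++ List.replicate 1 0 ++ col.drop (r+1) = col := by
        rw [List.replicate_succ]
        simpa using hdec.symm
      rw [harg] at key
      rw [key]
      have hfil : col.filter (fun v => v ≠ 0)
          = (col.take r).filter (fun v => v ≠ 0) ++ col.drop (r+1) := by
        conv_lhs => rw [hdec]
        simp [List.filter_append]
        intro a ha
        simpa using hd a ha
      rw [hfil]
      have hlen : col.length = r + 1 + (col.drop (r+1)).length := by
        simp [List.length_drop]; omega
      have hle := List.length_filter_le (fun v => decide (v ≠ 0)) (col.take r)
      rw [hlt] at hle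
      have hnum : 1 + (r - ((col.take r).filter (fun v => v ≠ 0)).length)
          = r + 1 + (col.drop (r+1)).length
              - (((col.take r).filter (fun v => v ≠ 0)).length + (col.drop (r+1)).length) := by
        omega
      rw [hnum, ← hlen]; simp
    · rw [if_neg hz]
      apply ih (by omega)
      intro i hi hri
      rcases Nat.eq_or_lt_of_le hri with hEq | hlt2
      · subst hEq; exact hz
      · exact h i hi hlt2

-- ===== simulation: A's 2-D loops act on one column =====

theorem pv_length_pvSet2 (b : List (List Int)) : ∀ (r c : Nat) (v : Int),
    (pvSet2 b r c v).length = b.length := by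
  induction b with
  | nil => intro r c v; cases r <;> simp [pvSet2]
  | cons row rest ih => intro r c v; cases r <;> simp [pvSet2, ih]

theorem pv_getElem_pvSet2 (b : List (List Int)) : ∀ (r c : Nat) (v : Int) (i : Nat)
    (hi : i < b.length),
    (pvSet2 b r c v)[i]'(by rw [pv_length_pvSet2]; exact hi)
      = if i = r then b[i].set c v else b[i] := by
  induction b with
  | nil => intro r c v i hi; simp at hi
  | cons row rest ih =>
    intro r c v i hi
    cases r with
    | zero => cases i <;> simp [pvSet2]
    | succ r =>
      cases i with
      | zero => simp [pvSet2]
      | succ i =>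
        have := ih r c v i (by simpa using hi)
        simp only [pvSet2, List.getElem_cons_succ]
        rw [this]
        simp

theorem pvAt_colOf (c : Nat) (b : List (List Int)) : ∀ (j : Nat),
    pvAt b j c = (pvColOf c b).getD j 0 := by
  induction b with
  | nil => intro j; cases j <;> rfl
  | cons row rest ih =>
    intro j
    cases j with
    | zero => rfl
    | succ j => simpa [pvAt, pvColOf] using ih j

theorem pvColOf_pvSet2 (c : Nat) (b : List (List Int)) : ∀ (r : Nat) (v : Int),
    (∀ row ∈ b, c < row.length) →
    pvColOf c (pvSet2 b r c v) = (pvColOf c b).set r v := by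
  induction b with
  | nil => intro r v _; cases r <;> simp [pvSet2, pvColOf]
  | cons row rest ih =>
    intro r v H
    cases r with
    | zero =>
      have hc : c < row.length := H row (by simp)
      simp only [pvSet2, pvColOf, List.map_cons, List.set_cons_zero]
      congr 1
      rw [List.getD_eq_getElem _ 0 (by simpa using hc)]
      simp
    | succ r =>
      simp only [pvSet2, pvColOf, List.map_cons, List.set_cons_succ]
      congr 1
      exact ih r v (fun rw hrw => H rw (by simp [hrw]))

theorem pvWriteCol_pvSet2 (c : Nat) (col : List Int) (b : List (List Int)) (r : Nat) (v : Int) :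
    pvWriteCol c col (pvSet2 b r c v) = pvWriteCol c col b := by
  apply List.ext_getElem
  · simp [pvWriteCol, pv_length_pvSet2]
  · intro i h1 h2
    have hi : i < b.length := by simpa [pvWriteCol] using h2
    simp only [pvWriteCol, List.getElem_mapIdx]
    rw [pv_getElem_pvSet2 b r c v i hi]
    split_ifs with h
    · rw [List.set_set]
    · rfl

theorem pvWriteCol_colOf (c : Nat) (b : List (List Int))
    (H : ∀ row ∈ b, c < row.length) :
    pvWriteCol c (pvColOf c b) b = b := by
  apply List.ext_getElem
  · simp [pvWriteCol]
  · intro i h1 h2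
    simp only [pvWriteCol, List.getElem_mapIdx]
    have hcol : (pvColOf c b).getD i 0 = b[i].getD c 0 := by
      rw [List.getD_eq_getElem _ 0 (by simpa [pvColOf] using h2)]
      simp [pvColOf]
    rw [hcol]
    exact pv_set_getD_self _ c (H b[i] (List.getElem_mem h2))

theorem pvH_pvSet2 (b : List (List Int)) (r c : Nat) (v : Int) (N : Nat)
    (H : ∀ row ∈ b, N ≤ row.length) :
    ∀ row ∈ pvSet2 b r c v, N ≤ row.length := by
  intro row hrow
  obtain ⟨i, hi, rfl⟩ := List.mem_iff_getElem.mp hrow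
  have hib : i < b.length := by rw [pv_length_pvSet2] at hi; exact hi
  rw [pv_getElem_pvSet2 b r c v i hib]
  split_ifs with h
  · rw [List.length_set]; exact H b[i] (List.getElem_mem hib)
  · exact H b[i] (List.getElem_mem hib)

theorem pvIdxLoop_sim (c : Nat) : ∀ (j count : Nat) (b : List (List Int)),
    (∀ row ∈ b, c < row.length) →
    pvIdxLoop c j count b = pvWriteCol c (pvIdxLoopL j count (pvColOf c b)) b := by
  intro j
  induction j with
  | zero => intro count b H; rw [pvIdxLoop, pvIdxLoopL, pvWriteCol_colOf c b H]
  | succ j ih =>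
    intro count b H
    rw [pvIdxLoop, pvIdxLoopL]
    simp only [pvAt_colOf c b j]
    by_cases hz : (pvColOf c b).getD j 0 = 0
    · rw [if_pos hz, if_pos hz]
      exact ih (count + 1) b H
    · rw [if_neg hz, if_neg hz]
      set v := (pvColOf c b).getD j 0 with hv
      have H1 : ∀ row ∈ pvSet2 b (j + count) c v, c < row.length := by
        intro row hrow
        have := pvH_pvSet2 b (j + count) c v (c + 1) (fun rw hrw => H rw hrw) row hrow
        omega
      have H2 : ∀ row ∈ pvSet2 (pvSet2 b (j + count) c v) j c 0, c < row.length := by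
        intro row hrow
        have := pvH_pvSet2 _ j c 0 (c + 1) (fun rw hrw => H1 rw hrw) row hrow
        omega
      rw [ih count _ H2]
      rw [pvColOf_pvSet2 c _ j 0 H1, pvColOf_pvSet2 c b (j + count) v (fun rw hrw => H rw hrw)]
      rw [pvWriteCol_pvSet2, pvWriteCol_pvSet2]

theorem pvRowLoop_sim (c : Nat) : ∀ (m : Nat) (b : List (List Int)),
    (∀ row ∈ b, c < row.length) →
    pvRowLoop c m b = pvWriteCol c (pvRowLoopL m (pvColOf c b)) b := by
  intro m
  induction m with
  | zero => intro b H; rw [pvRowLoop, pvRowLoopL, pvWriteCol_colOf c b H]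
  | succ m ih =>
    intro b H
    rw [pvRowLoop, pvRowLoopL]
    simp only [pvAt_colOf c b m]
    by_cases hz : (pvColOf c b).getD m 0 = 0
    · rw [if_pos hz, if_pos hz]
      exact pvIdxLoop_sim c m 1 b H
    · rw [if_neg hz, if_neg hz]
      exact ih b H

-- one full column step of A equals one full column step of B
theorem pv_column_step (c : Nat) (b : List (List Int))
    (H : ∀ row ∈ b, c < row.length) :
    pvRowLoop c b.length b = pvWriteCol c (pvCompactCol b.length (pvColOf c b)) b := by
  rw [pvRowLoop_sim c b.length b H]
  congr 1
  have hlen : (pvColOf c b).length = b.length := by simp [pvColOf]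
  rw [← hlen]
  rw [pvRowLoopL_eq (pvColOf c b) (pvColOf c b).length (le_refl _)
      (fun i hi hle => absurd hi (by omega))]
  simp [pvCompactCol, hlen]

theorem pvH_writeCol (c : Nat) (col : List Int) (b : List (List Int)) (N : Nat)
    (H : ∀ row ∈ b, N ≤ row.length) :
    ∀ row ∈ pvWriteCol c col b, N ≤ row.length := by
  intro row hrow
  obtain ⟨i, hi, rfl⟩ := List.mem_iff_getElem.mp hrow
  have hib : i < b.length := by simpa [pvWriteCol] using hi
  simp only [pvWriteCol, List.getElem_mapIdx, List.length_set]
  exact H b[i] (List.getElem_mem hib)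

theorem pv_fold_eq (N : Nat) : ∀ (l : List Nat), (∀ x ∈ l, x < N) →
    ∀ (b : List (List Int)), (∀ row ∈ b, N ≤ row.length) →
    l.foldl (fun b c => pvRowLoop c b.length b) b
      = l.foldl (fun b c => pvWriteCol c (pvCompactCol b.length (pvColOf c b)) b) b := by
  intro l
  induction l with
  | nil => intro _ b _; rfl
  | cons c t ih =>
    intro hl b H
    have hc : ∀ row ∈ b, c < row.length := by
      intro row hrow
      have := H row hrow
      have := hl c (by simp)
      omega
    simp only [List.foldl_cons]
    rw [pv_column_step c b hc]
    exact ih (fun x hx => hl x (by simp [hx])) _ (pvH_writeCol c _ b N H)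

-- ===== VERDICT (by name: the statement is the Claim_ definition above) =====
theorem vertical_compaction_spec : Claim_equal_vertical_compaction := by
  intro board _ hpre
  unfold Spec_vertical_compaction vertical_compaction vertical_compaction_alt
  obtain ⟨hne, hrows⟩ := hpre
  exact (pv_fold_eq (board.headD []).length (List.range (board.headD []).length)
    (fun x hx => List.mem_range.mp hx) board hrows)
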